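-- pv_equiv track=rewrite | github.com/minhaoJ2/Contamination_For_PreTraining | apo/utils.py | contaminated_tokens_llama2
-- ===== SOURCE A (Python) =====
-- from typing import Union, List, Set, Tuple, Generator, Optional, Any
--
-- def get_ngrams(tokens: List[int], ngram: int = 13) -> Set[Tuple[int]]:
--     """Returns a set of n-grams from a sequence of token ids."""
--     return {tuple(tokens[i:i + ngram]) for i in range(len(tokens) - ngram + 1)}
--
-- def contaminated_tokens_llama2(train_tokens: List[int],
--                                eval_ngrams: Set[Tuple[int]],
--                                ngram: int = 13,
--                                dirty_threshold: float = 0.8,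
--                                *args,
--                                **kwargs) -> Set[int]:
--     """Returns whether a sequence of tokens is contaminated based on Llama2's contamination rule."""
--     train_ngrams = get_ngrams(train_tokens, ngram)
--     intersect_ngrams = train_ngrams.intersection(eval_ngrams)
--
--     contaminated_tokens = set()
--     for token in train_tokens:
--         if any(token in ngram for ngram in intersect_ngrams):
--             contaminated_tokens.add(token)
--     return contaminated_tokens
-- ===== SOURCE B (Python) =====
-- def contaminated_tokens_llama2(train_tokens, eval_ngrams, ngram=13, dirty_threshold=0.8, *args, **kwargs):
--     """Single windowed scan: collect tokens of train n-grams that occur in eval_ngrams."""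
--     bad = set()
--     for i in range(len(train_tokens) - ngram + 1):
--         ng = tuple(train_tokens[i:i + ngram])
--         if ng in eval_ngrams:
--             bad.update(ng)
--     return {t for t in train_tokens if t in bad}
-- ===== Notes on version B (the rewrite author's own statement) =====
-- stated objective: alternative
-- what changed: Drops get_ngrams, the explicit train_ngrams set and the set intersection: one windowed scan tests each train n-gram against eval_ngrams directly and unions the tokens of the hits, replacing A's nested token-vs-intersected-ngram membership loop.
import Mathlib
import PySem

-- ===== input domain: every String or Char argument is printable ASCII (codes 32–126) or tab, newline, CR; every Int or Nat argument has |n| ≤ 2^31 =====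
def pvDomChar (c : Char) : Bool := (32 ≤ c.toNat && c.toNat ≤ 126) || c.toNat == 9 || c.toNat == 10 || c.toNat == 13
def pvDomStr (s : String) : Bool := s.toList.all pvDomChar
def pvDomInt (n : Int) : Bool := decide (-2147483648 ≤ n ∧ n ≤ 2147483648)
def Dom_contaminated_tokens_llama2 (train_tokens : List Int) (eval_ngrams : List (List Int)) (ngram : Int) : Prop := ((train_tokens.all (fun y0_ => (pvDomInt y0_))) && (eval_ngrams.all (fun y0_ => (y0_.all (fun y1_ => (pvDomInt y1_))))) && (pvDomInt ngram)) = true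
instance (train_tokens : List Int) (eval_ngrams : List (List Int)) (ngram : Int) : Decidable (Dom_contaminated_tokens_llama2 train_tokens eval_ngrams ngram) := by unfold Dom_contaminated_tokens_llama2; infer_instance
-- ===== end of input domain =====

-- B: drops get_ngrams, the train_ngrams set and the intersection; one windowed scan unions the
-- tokens of train n-grams present in eval_ngrams, then selects the train tokens in that set.
-- ===== PORT A =====
def get_ngrams (tokens : List Int) (ngram : Int) : PySem.Set (List Int) :=
  (PySem.List.pyRange 0 ((tokens.length : Int) - ngram + 1) 1).foldl
    (fun s i => PySem.Set.add s (PySem.List.slice tokens (some i) (some (i + ngram))))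
    PySem.Set.empty

def contaminated_tokens_llama2 (train_tokens : List Int) (eval_ngrams : List (List Int)) (ngram : Int) : List Int :=
  let train_ngrams := get_ngrams train_tokens ngram
  let intersect_ngrams := PySem.Set.inter train_ngrams eval_ngrams
  train_tokens.foldl
    (fun contaminated token =>
      if intersect_ngrams.any (fun ng => ng.contains token) then
        PySem.Set.add contaminated token
      else contaminated)
    PySem.Set.empty

-- ===== PORT B =====
def contaminated_tokens_llama2_alt (train_tokens : List Int) (eval_ngrams : List (List Int)) (ngram : Int) : List Int :=
  let bad := (PySem.List.pyRange 0 ((train_tokens.length : Int) - ngram + 1) 1).foldl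
    (fun b i =>
      let ng := PySem.List.slice train_tokens (some i) (some (i + ngram))
      if PySem.Set.contains eval_ngrams ng then PySem.Set.update b ng else b)
    PySem.Set.empty
  train_tokens.foldl
    (fun s t => if PySem.Set.contains bad t then PySem.Set.add s t else s)
    PySem.Set.empty

-- ===== PRECONDITION & SPEC =====
def Spec_contaminated_tokens_llama2 (train_tokens : List Int) (eval_ngrams : List (List Int)) (ngram : Int) (out : List Int) : Prop := out = contaminated_tokens_llama2_alt train_tokens eval_ngrams ngram
instance (train_tokens : List Int) (eval_ngrams : List (List Int)) (ngram : Int) (out : List Int) : Decidable (Spec_contaminated_tokens_llama2 train_tokens eval_ngrams ngram out) := by unfold Spec_contaminated_tokens_llama2; infer_instance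

-- ===== CLAIM (what is proved, stated in full; the proofs are below) =====
def Claim_equal_contaminated_tokens_llama2 : Prop := ∀ (train_tokens : List Int) (eval_ngrams : List (List Int)) (ngram : Int), Dom_contaminated_tokens_llama2 train_tokens eval_ngrams ngram → Spec_contaminated_tokens_llama2 train_tokens eval_ngrams ngram (contaminated_tokens_llama2 train_tokens eval_ngrams ngram)

-- ===== LEMMAS AND PROOFS =====

-- membership in B's 'bad' accumulator
lemma mem_foldl_update (t : Int) (w : Int → List Int) (c : Int → Bool) :
    ∀ (l : List Int) (b : PySem.Set Int),
      (t ∈ l.foldl (fun b i => if c i then PySem.Set.update b (w i) else b) b ↔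
        t ∈ b ∨ ∃ i ∈ l, c i = true ∧ t ∈ w i) := by
  intro l
  induction l with
  | nil => simp
  | cons x xs ih =>
      intro b
      simp only [List.foldl_cons, List.mem_cons]
      by_cases hx : c x = true
      · rw [if_pos hx, ih, PySem.Set.mem_update]
        constructor
        · rintro ((hb | hw) | ⟨i, hi, hc, ht⟩)
          · exact Or.inl hb
          · exact Or.inr ⟨x, Or.inl rfl, hx, hw⟩
          · exact Or.inr ⟨i, Or.inr hi, hc, ht⟩
        · rintro (hb | ⟨i, (rfl | hi), hc, ht⟩)
          · exact Or.inl (Or.inl hb)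
          · exact Or.inl (Or.inr ht)
          · exact Or.inr ⟨i, hi, hc, ht⟩
      · rw [if_neg hx, ih]
        constructor
        · rintro (hb | ⟨i, hi, hc, ht⟩)
          · exact Or.inl hb
          · exact Or.inr ⟨i, Or.inr hi, hc, ht⟩
        · rintro (hb | ⟨i, (rfl | hi), hc, ht⟩)
          · exact Or.inl hb
          · exact absurd hc hx
          · exact Or.inr ⟨i, hi, hc, ht⟩

-- the two add-if-condition folds agree when the conditions agree pointwise
lemma foldl_add_if_congr (p q : Int → Bool) (h : ∀ t, p t = q t) (xs : List Int) (s : PySem.Set Int) :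
    xs.foldl (fun s t => if p t then PySem.Set.add s t else s) s =
      xs.foldl (fun s t => if q t then PySem.Set.add s t else s) s := by
  have : p = q := funext h
  rw [this]

-- A's membership condition coincides with B's for every token
lemma cond_eq (train_tokens : List Int) (eval_ngrams : List (List Int)) (ngram : Int) (t : Int) :
    (PySem.Set.inter (get_ngrams train_tokens ngram) eval_ngrams).any (fun ng => ng.contains t) =
      PySem.Set.contains
        ((PySem.List.pyRange 0 ((train_tokens.length : Int) - ngram + 1) 1).foldl
          (fun b i =>
            if PySem.Set.contains eval_ngrams (PySem.List.slice train_tokens (some i) (some (i + ngram))) then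
              PySem.Set.update b (PySem.List.slice train_tokens (some i) (some (i + ngram)))
            else b)
          PySem.Set.empty) t := by
  have hng : get_ngrams train_tokens ngram =
      PySem.Set.ofList ((PySem.List.pyRange 0 ((train_tokens.length : Int) - ngram + 1) 1).map
        (fun i => PySem.List.slice train_tokens (some i) (some (i + ngram)))) := by
    rw [PySem.Set.ofList_eq_foldl, List.foldl_map, get_ngrams]; rfl
  rw [Bool.eq_iff_iff, PySem.Set.contains_iff,
    mem_foldl_update t (fun i => PySem.List.slice train_tokens (some i) (some (i + ngram)))
      (fun i => PySem.Set.contains eval_ngrams (PySem.List.slice train_tokens (some i) (some (i + ngram))))]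
  simp only [List.any_eq_true, hng, PySem.Set.mem_inter, PySem.Set.mem_ofList, List.mem_map,
    PySem.Set.contains_iff, List.contains_eq_mem, decide_eq_true_eq]
  constructor
  · rintro ⟨ng, ⟨⟨i, hi, rfl⟩, hev⟩, ht⟩
    exact Or.inr ⟨i, hi, by simpa [PySem.Set.contains_iff] using hev, ht⟩
  · rintro (h | ⟨i, hi, hev, ht⟩)
    · simp [PySem.Set.empty] at h
    · exact ⟨_, ⟨⟨i, hi, rfl⟩, by simpa [PySem.Set.contains_iff] using hev⟩, ht⟩

-- ===== VERDICT (by name: the statement is the Claim_ definition above) =====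
theorem contaminated_tokens_llama2_spec : Claim_equal_contaminated_tokens_llama2 := by
  intro train_tokens eval_ngrams ngram _
  unfold Spec_contaminated_tokens_llama2 contaminated_tokens_llama2 contaminated_tokens_llama2_alt
  exact foldl_add_if_congr _ _ (cond_eq train_tokens eval_ngrams ngram) train_tokens PySem.Set.empty
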